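-- pv_equiv track=rewrite | github.com/981377660LMT/algorithm-study | 16_滑动窗口/定长滑窗/滑动窗口topK之和.py | windowTopKSum
-- ===== SOURCE A (Python) =====
-- from collections import defaultdict
-- from heapq import heappop, heappush
-- from typing import List
--
-- def windowTopKSum(nums: List[int], windowSize: int, k: int) -> List[int]:
--     n = len(nums)
--     ts = TopKSum(k)
--     res = []
--     for right in range(n):
--         ts.add(nums[right])
--         if right >= windowSize:
--             ts.discard(nums[right - windowSize])
--         if right >= windowSize - 1:
--             res.append(ts.query())
--     return res
--
-- class TopKSum:
--     """默认是`最小`的k个数之和,如果要`最大`的k个数之和,需要手动添加负号"""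
--
--     # in d_in 是大根堆，out d_out 是小根堆
--     __slots__ = ("_sum", "_k", "_in", "_out", "_d_in", "_d_out", "_c")
--
--     def __init__(self, k: int) -> None:
--         self._k = k
--         self._sum = 0
--         self._in = []
--         self._out = []
--         self._d_in = []
--         self._d_out = []
--         self._c = defaultdict(int)
--
--     def query(self) -> int:
--         return self._sum
--
--     def add(self, x: int) -> None:
--         self._c[x] += 1
--         heappush(self._in, -x)
--         self._sum += x
--         self._modify()
--
--     def discard(self, x: int) -> None:
--         if self._c[x] == 0:
--             return
--         self._c[x] -= 1
--         if self._in and -self._in[0] == x: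
--             self._sum -= x
--             heappop(self._in)
--         elif self._in and -self._in[0] > x:
--             self._sum -= x
--             heappush(self._d_in, -x)
--         else:
--             heappush(self._d_out, x)
--         self._modify()
--
--     def set_k(self, k: int) -> None:
--         self._k = k
--         self._modify()
--
--     def get_k(self) -> int:
--         return self._k
--
--     def _modify(self) -> None:
--         while self._out and (len(self._in) - len(self._d_in) < self._k):
--             p = heappop(self._out)
--             if self._d_out and p == self._d_out[0]:
--                 heappop(self._d_out)
--             else:
--                 self._sum += p
--                 heappush(self._in, -p)
--
--         while len(self._in) - len(self._d_in) > self._k: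
--             p = -heappop(self._in)
--             if self._d_in and p == -self._d_in[0]:
--                 heappop(self._d_in)
--             else:
--                 self._sum -= p
--                 heappush(self._out, p)
--         while self._d_in and self._in[0] == self._d_in[0]:
--             heappop(self._in)
--             heappop(self._d_in)
--
--     def __len__(self) -> int:
--         return len(self._in) + len(self._out) - len(self._d_in) - len(self._d_out)
--
--     def __contains__(self, x: int) -> bool:
--         return self._c[x] > 0
-- ===== SOURCE B (Python) =====
-- from typing import List
--
--
-- def windowTopKSum(nums: List[int], windowSize: int, k: int) -> List[int]:
--     res = []
--     for right in range(len(nums)):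
--         if right >= windowSize - 1:
--             window = sorted(nums[right - windowSize + 1: right + 1])
--             res.append(sum(window[:k]))
--     return res
-- ===== Notes on version B (the rewrite author's own statement) =====
-- stated objective: simpler
-- what changed: Drops the two lazy-deletion heaps and the TopKSum class entirely: each emitted window is recomputed directly by slicing, sorting and summing the first k elements.
import Mathlib
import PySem

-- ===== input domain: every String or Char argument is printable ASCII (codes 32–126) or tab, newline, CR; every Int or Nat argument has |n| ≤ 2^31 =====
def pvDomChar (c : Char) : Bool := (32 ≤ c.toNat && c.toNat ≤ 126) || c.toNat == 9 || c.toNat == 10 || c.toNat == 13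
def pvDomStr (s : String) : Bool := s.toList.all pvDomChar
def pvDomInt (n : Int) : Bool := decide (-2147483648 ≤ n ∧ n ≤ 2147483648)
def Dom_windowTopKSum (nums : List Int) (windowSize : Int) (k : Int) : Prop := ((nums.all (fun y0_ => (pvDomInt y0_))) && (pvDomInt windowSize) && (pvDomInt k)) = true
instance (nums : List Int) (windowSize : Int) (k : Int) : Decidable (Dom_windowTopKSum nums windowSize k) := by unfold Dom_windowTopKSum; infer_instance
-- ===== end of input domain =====

-- B replaces A's incremental TopKSum structure (two lazy-deletion heaps + counter) by
-- recomputing each emitted window with slice/sort/sum — simpler, no claim of speed.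

-- ===== PORT A =====
-- Python's heapq list is modelled by a sorted (ascending) list: exact for the
-- operations A uses (heappush, heappop = pop-min, heap[0] = peek-min).
def hpush (l : List Int) (x : Int) : List Int := List.orderedInsert (· ≤ ·) x l

structure TK where
  k : Int
  sum : Int
  inH : List Int     -- self._in  (stores negated values)
  outH : List Int    -- self._out
  dIn : List Int     -- self._d_in (negated values)
  dOut : List Int    -- self._d_out
  c : PySem.Dict Int Int
  deriving Repr, DecidableEq

-- first while-loop of _modify: refill `in` from `out` while len(in)-len(d_in) < k
def modLoop1 (k : Int) (dInLen : Nat) (sum : Int) (inH outH dOut : List Int) :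
    Int × List Int × List Int × List Int :=
  match outH with
  | [] => (sum, inH, [], dOut)
  | p :: rest =>
    if (inH.length : Int) - (dInLen : Int) < k then
      match dOut with
      | q :: qrest =>
        if p = q then modLoop1 k dInLen sum inH rest qrest
        else modLoop1 k dInLen (sum + p) (hpush inH (-p)) rest (q :: qrest)
      | [] => modLoop1 k dInLen (sum + p) (hpush inH (-p)) rest []
    else (sum, inH, p :: rest, dOut)
  termination_by outH.length

-- second while-loop of _modify: spill from `in` to `out` while len(in)-len(d_in) > k
-- (the `[]` case is unreachable for 0 ≤ k: Python would raise there, excluded by Pre_)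
def modLoop2 (k : Int) (sum : Int) (inH outH dIn : List Int) :
    Int × List Int × List Int × List Int :=
  if (inH.length : Int) - (dIn.length : Int) > k then
    match inH with
    | [] => (sum, [], outH, dIn)
    | np :: rest =>
      match dIn with
      | dq :: dqrest =>
        if (-np : Int) = -dq then modLoop2 k sum rest outH dqrest
        else modLoop2 k (sum - (-np)) rest (hpush outH (-np)) (dq :: dqrest)
      | [] => modLoop2 k (sum - (-np)) rest (hpush outH (-np)) []
  else (sum, inH, outH, dIn)
  termination_by inH.length

-- third while-loop of _modify: drop matching dead tops of `in`
def modLoop3 (inH dIn : List Int) : List Int × List Int :=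
  match dIn, inH with
  | dq :: dqrest, p :: prest =>
    if p = dq then modLoop3 prest dqrest else (p :: prest, dq :: dqrest)
  | dIn, inH => (inH, dIn)

def tkModify (st : TK) : TK :=
  let r1 := modLoop1 st.k st.dIn.length st.sum st.inH st.outH st.dOut
  let r2 := modLoop2 st.k r1.1 r1.2.1 r1.2.2.1 st.dIn
  let r3 := modLoop3 r2.2.1 r2.2.2.2
  { st with sum := r2.1, inH := r3.1, outH := r2.2.2.1, dIn := r3.2, dOut := r1.2.2.2 }

def tkAdd (st : TK) (x : Int) : TK :=
  tkModify { st with c := st.c.modify x 0 (· + 1),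
                     inH := hpush st.inH (-x),
                     sum := st.sum + x }

def tkDiscard (st : TK) (x : Int) : TK :=
  if st.c.getD x 0 = 0 then st
  else
    let c' := st.c.modify x 0 (· - 1)
    match st.inH with
    | p :: rest =>
      if -p = x then tkModify { st with c := c', sum := st.sum - x, inH := rest }
      else if -p > x then tkModify { st with c := c', sum := st.sum - x, dIn := hpush st.dIn (-x) }
      else tkModify { st with c := c', dOut := hpush st.dOut x }
    | [] => tkModify { st with c := c', dOut := hpush st.dOut x }

def tkInit (k : Int) : TK := ⟨k, 0, [], [], [], [], PySem.Dict.empty⟩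

def windowTopKSum (nums : List Int) (windowSize : Int) (k : Int) : List Int :=
  ((List.range nums.length).foldl
    (fun (acc : TK × List Int) r =>
      let ts1 := tkAdd acc.1 (nums.getD r 0)
      let ts2 :=
        if windowSize ≤ (r : Int) then
          -- nums[right - windowSize]; `none` = Python IndexError (outside Pre_)
          match PySem.List.pyGet? nums ((r : Int) - windowSize) with
          | some v => tkDiscard ts1 v
          | none => ts1
        else ts1
      (ts2, if windowSize - 1 ≤ (r : Int) then acc.2 ++ [ts2.sum] else acc.2))
    (tkInit k, [])).2

-- ===== PORT B =====
def windowTopKSum_alt (nums : List Int) (windowSize : Int) (k : Int) : List Int :=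
  (List.range nums.length).foldl
    (fun res (r : Nat) =>
      if windowSize - 1 ≤ (r : Int) then
        res ++ [(PySem.List.slice
                   (PySem.List.sorted
                     (PySem.List.slice nums (some ((r : Int) - windowSize + 1)) (some ((r : Int) + 1)))
                     (fun x => x) false)
                 none (some k)).sum]
      else res)
    []

-- ===== PRECONDITION & SPEC =====
-- Pre_ excludes exactly the inputs on which A raises: with non-empty nums, a negative
-- windowSize makes nums[right - windowSize] an out-of-range IndexError, and a negative k
-- makes _modify heappop from an empty heap (IndexError).
def Pre_windowTopKSum (nums : List Int) (windowSize : Int) (k : Int) : Prop :=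
  nums = [] ∨ (0 ≤ windowSize ∧ 0 ≤ k)
instance (nums : List Int) (windowSize : Int) (k : Int) : Decidable (Pre_windowTopKSum nums windowSize k) := by unfold Pre_windowTopKSum; infer_instance

def pvWitness_windowTopKSum : List Int × Int × Int := ([3, 1, 4, 1, 5], 3, 2)

def Spec_windowTopKSum (nums : List Int) (windowSize : Int) (k : Int) (out : List Int) : Prop := out = windowTopKSum_alt nums windowSize k
instance (nums : List Int) (windowSize : Int) (k : Int) (out : List Int) : Decidable (Spec_windowTopKSum nums windowSize k out) := by unfold Spec_windowTopKSum; infer_instance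

-- ===== CLAIM (what is proved, stated in full; the proofs are below) =====
def Claim_equal_windowTopKSum : Prop := ∀ (nums : List Int) (windowSize : Int) (k : Int), Dom_windowTopKSum nums windowSize k → Pre_windowTopKSum nums windowSize k → Spec_windowTopKSum nums windowSize k (windowTopKSum nums windowSize k)

-- ===== LEMMAS AND PROOFS =====

-- actual values currently held by the in-side / out-side (in-side stores negations)
def liveIn (inH dIn : List Int) : Multiset Int := (inH : Multiset Int) - (dIn : Multiset Int)

def negM (s : Multiset Int) : Multiset Int := s.map (fun z => -z)

-- the full representation invariant of a TopKSum state holding the multiset W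
structure TKInv (k : Int) (W : Multiset Int) (st : TK) : Prop where
  hk : st.k = k
  sIn : st.inH.Pairwise (· ≤ ·)
  sOut : st.outH.Pairwise (· ≤ ·)
  sDIn : st.dIn.Pairwise (· ≤ ·)
  sDOut : st.dOut.Pairwise (· ≤ ·)
  subIn : (st.dIn : Multiset Int) ≤ (st.inH : Multiset Int)
  subOut : (st.dOut : Multiset Int) ≤ (st.outH : Multiset Int)
  counts : ∀ x, st.c.getD x 0 = (W.count x : Int)
  hW : W = negM (liveIn st.inH st.dIn) + liveIn st.outH st.dOut
  hsum : st.sum = (negM (liveIn st.inH st.dIn)).sum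
  hcard : (liveIn st.inH st.dIn).card = min k.toNat W.card
  horder : ∀ a ∈ liveIn st.inH st.dIn, ∀ b ∈ liveIn st.outH st.dOut, -a ≤ b
  hclean : ∀ d ∈ st.dIn, ∃ h t, st.inH = h :: t ∧ h < d

-- ---- generic facts ----
lemma cons_sub_cons_ms (a : Int) (s t : Multiset Int) : (a ::ₘ s) - (a ::ₘ t) = s - t := by
  ext x
  simp [Multiset.count_sub]
lemma hpush_coe (l : List Int) (x : Int) : (hpush l x : Multiset Int) = x ::ₘ (l : Multiset Int) := by
  exact Quot.sound (List.perm_orderedInsert _ x l)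
lemma hpush_sorted {l : List Int} (h : l.Pairwise (· ≤ ·)) (x : Int) : (hpush l x).Pairwise (· ≤ ·) := by
  exact List.Pairwise.orderedInsert x l h
lemma sorted_head_le {l : List Int} (hsrt : l.Pairwise (· ≤ ·)) {a y : Int} {t : List Int}
    (hl : l = a :: t) (hy : y ∈ (l : Multiset Int)) : a ≤ y := by
  subst hl
  simp [Multiset.mem_coe] at hy
  rcases hy with h1 | h1
  · omega
  · exact (List.pairwise_cons.1 hsrt).1 y h1
-- ---- multiset helpers ----
lemma coe_cons_ms (a : Int) (l : List Int) : ((a :: l : List Int) : Multiset Int) = a ::ₘ (l : Multiset Int) := by simp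

lemma live_cons_cons (a : Int) (l d : List Int) : liveIn (a :: l) (a :: d) = liveIn l d := by
  unfold liveIn; rw [coe_cons_ms, coe_cons_ms, cons_sub_cons_ms]

lemma sub_cons_of_le {s t : Multiset Int} {a : Int} (h : t ≤ s) : (a ::ₘ s) - t = a ::ₘ (s - t) := by
  ext x
  have := Multiset.le_iff_count.1 h x
  simp [Multiset.count_sub, Multiset.count_cons]
  split_ifs <;> omega

lemma live_cons {a : Int} {l d : List Int} (h : (d : Multiset Int) ≤ (l : Multiset Int)) :
    liveIn (a :: l) d = a ::ₘ liveIn l d := by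
  unfold liveIn; rw [coe_cons_ms, sub_cons_of_le h]

lemma live_card {l d : List Int} (h : (d : Multiset Int) ≤ (l : Multiset Int)) :
    (liveIn l d).card = l.length - d.length := by
  unfold liveIn; rw [Multiset.card_sub h]; simp

lemma live_le_list (l d : List Int) : liveIn l d ≤ (l : Multiset Int) := by
  unfold liveIn; exact Multiset.sub_le_self _ _

lemma dsub_tail {p dq : Int} {rest dt : List Int} (hIn : (p :: rest).Pairwise (· ≤ ·))
    (hD : (dq :: dt).Pairwise (· ≤ ·))
    (hsub : ((dq :: dt : List Int) : Multiset Int) ≤ ((p :: rest : List Int) : Multiset Int))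
    (hne : p ≠ dq) : ((dq :: dt : List Int) : Multiset Int) ≤ (rest : Multiset Int) := by
  have hpd : p ≤ dq := sorted_head_le hIn rfl (Multiset.mem_of_le hsub (by simp))
  have hplt : ∀ y ∈ ((dq :: dt : List Int) : Multiset Int), p < y := by
    intro y hy
    rw [coe_cons_ms, Multiset.mem_cons] at hy
    rcases hy with h1 | h1
    · omega
    · have : dq ≤ y := (List.pairwise_cons.1 hD).1 y (by simpa using h1)
      omega
  rw [Multiset.le_iff_count] at hsub ⊢
  intro y
  by_cases hyp : y = p
  · have h0 : Multiset.count y ((dq :: dt : List Int) : Multiset Int) = 0 := by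
      rw [Multiset.count_eq_zero]
      intro hmem
      have := hplt y hmem
      omega
    rw [h0]; exact Nat.zero_le _
  · have := hsub y
    rw [coe_cons_ms p rest, Multiset.count_cons_of_ne hyp] at this
    exact this

lemma negM_cons (a : Int) (s : Multiset Int) : negM (a ::ₘ s) = -a ::ₘ negM s := Multiset.map_cons _ _ _
lemma negM_add (s t : Multiset Int) : negM (s + t) = negM s + negM t := Multiset.map_add _ _ _
lemma negM_card (s : Multiset Int) : (negM s).card = s.card := Multiset.card_map _ _
lemma negM_sum (s : Multiset Int) : (negM s).sum = -s.sum := by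
  induction s using Multiset.induction with
  | empty => simp [negM]
  | cons a s ih => rw [negM_cons, Multiset.sum_cons, Multiset.sum_cons, ih]; ring
lemma mem_negM {b : Int} {s : Multiset Int} : b ∈ negM s ↔ -b ∈ s := by
  unfold negM
  simp only [Multiset.mem_map]
  constructor
  · rintro ⟨a, ha, rfl⟩; simpa using ha
  · intro h; exact ⟨-b, h, by ring⟩

lemma negM_negM (s : Multiset Int) : negM (negM s) = s := by
  unfold negM
  rw [Multiset.map_map]
  simp

lemma sub_add_comm_ms {A B : Multiset Int} (C : Multiset Int) (h : B ≤ A) :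
    (A + C) - B = (A - B) + C := by
  ext x
  have := Multiset.le_iff_count.1 h x
  simp [Multiset.count_sub, Multiset.count_add]
  omega

lemma card_sub_of_le {s t : Multiset Int} (h : s ≤ t) : (t - s).card = t.card - s.card :=
  Multiset.card_sub h

-- ---- loop 1 ----
structure L1Out (k : Int) (dInLen : Nat) (sum : Int) (inH outH dOut : List Int)
    (res : Int × List Int × List Int × List Int) : Prop where
  sIn : res.2.1.Pairwise (· ≤ ·)
  sOut : res.2.2.1.Pairwise (· ≤ ·)
  sDOut : res.2.2.2.Pairwise (· ≤ ·)
  sub : (res.2.2.2 : Multiset Int) ≤ (res.2.2.1 : Multiset Int)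
  hle : liveIn res.2.2.1 res.2.2.2 ≤ liveIn outH dOut
  hin : (res.2.1 : Multiset Int) =
    (inH : Multiset Int) + negM (liveIn outH dOut - liveIn res.2.2.1 res.2.2.2)
  hsum : res.1 = sum + (liveIn outH dOut - liveIn res.2.2.1 res.2.2.2).sum
  hmoved : ∀ b ∈ liveIn res.2.2.1 res.2.2.2,
    ∀ m ∈ liveIn outH dOut - liveIn res.2.2.1 res.2.2.2, m ≤ b
  hstop : (k ≤ (res.2.1.length : Int) - (dInLen : Int)) ∨ liveIn res.2.2.1 res.2.2.2 = 0
  hbound : (res.2.1.length : Int) - (dInLen : Int) ≤ max ((inH.length : Int) - (dInLen : Int)) k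

lemma modLoop1_spec (k : Int) (dInLen : Nat) (sum : Int) (inH outH dOut : List Int)
    (hIn : inH.Pairwise (· ≤ ·)) (hOut : outH.Pairwise (· ≤ ·)) (hDOut : dOut.Pairwise (· ≤ ·))
    (hsub : (dOut : Multiset Int) ≤ (outH : Multiset Int)) :
    L1Out k dInLen sum inH outH dOut (modLoop1 k dInLen sum inH outH dOut) := by
  revert hIn hOut hDOut hsub
  fun_induction modLoop1 k dInLen sum inH outH dOut with
  | case1 sum inH dOut =>
    intro hIn hOut hDOut hsub
    have hz : liveIn ([] : List Int) dOut = 0 := Multiset.zero_sub _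
    refine ⟨hIn, by simp, hDOut, hsub, le_rfl, by simp [negM], by simp, ?_, Or.inr hz, ?_⟩
    · intro b _ m hm; simp at hm
    · exact le_max_left _ _
  | case2 sum inH rest hg dq dqrest ih =>
    intro hIn hOut hDOut hsub
    have hsub' : (dqrest : Multiset Int) ≤ (rest : Multiset Int) := by
      have h2 : (dq ::ₘ (dqrest : Multiset Int)) ≤ (dq ::ₘ (rest : Multiset Int)) := by
        rw [← coe_cons_ms, ← coe_cons_ms]; exact hsub
      exact (Multiset.cons_le_cons_iff dq).1 h2
    have out := ih hIn hOut.of_cons hDOut.of_cons hsub'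
    have hl : liveIn (dq :: rest) (dq :: dqrest) = liveIn rest dqrest := live_cons_cons _ _ _
    exact ⟨out.sIn, out.sOut, out.sDOut, out.sub, hl ▸ out.hle, hl ▸ out.hin,
           hl ▸ out.hsum, hl ▸ out.hmoved, out.hstop, out.hbound⟩
  | case3 sum inH np rest hg dq dqrest hne ih =>
    intro hIn hOut hDOut hsub
    have hsub' : ((dq :: dqrest : List Int) : Multiset Int) ≤ (rest : Multiset Int) :=
      dsub_tail hOut hDOut hsub hne
    have out := ih (hpush_sorted hIn (-np)) hOut.of_cons hDOut hsub'
    have hl : liveIn (np :: rest) (dq :: dqrest) = np ::ₘ liveIn rest (dq :: dqrest) :=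
      live_cons hsub'
    have hdiff : liveIn (np :: rest) (dq :: dqrest)
        - liveIn (modLoop1 k dInLen (sum + np) (hpush inH (-np)) rest (dq :: dqrest)).2.2.1
                 (modLoop1 k dInLen (sum + np) (hpush inH (-np)) rest (dq :: dqrest)).2.2.2
        = np ::ₘ (liveIn rest (dq :: dqrest)
        - liveIn (modLoop1 k dInLen (sum + np) (hpush inH (-np)) rest (dq :: dqrest)).2.2.1
                 (modLoop1 k dInLen (sum + np) (hpush inH (-np)) rest (dq :: dqrest)).2.2.2) := by
      rw [hl, sub_cons_of_le out.hle]
    have hplen : ((hpush inH (-np)).length : Int) = (inH.length : Int) + 1 := by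
      rw [hpush]; rw [List.orderedInsert_length]; push_cast; ring
    refine ⟨out.sIn, out.sOut, out.sDOut, out.sub, ?_, ?_, ?_, ?_, out.hstop, ?_⟩
    · exact out.hle.trans (by rw [hl]; exact Multiset.le_cons_self _ _)
    · rw [hdiff, negM_cons, out.hin, hpush_coe]
      ext x
      simp [Multiset.count_add, Multiset.count_cons, List.count_cons]
      split_ifs <;> omega
    · have h1 := out.hsum
      rw [hdiff, Multiset.sum_cons]
      omega
    · intro b hb m hm
      rw [hdiff, Multiset.mem_cons] at hm
      rcases hm with rfl | hm
      · have hb' : b ∈ (rest : Multiset Int) :=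
          Multiset.mem_of_le ((out.hle).trans (live_le_list _ _)) hb
        exact sorted_head_le hOut rfl (by rw [coe_cons_ms]; exact Multiset.mem_cons_of_mem hb')
      · exact out.hmoved b hb m hm
    · have h1 := out.hbound
      rw [hplen] at h1
      have h2 : (modLoop1 k dInLen (sum + np) (hpush inH (-np)) rest (dq :: dqrest)).2.1.length
          - (dInLen : Int) ≤ k := h1.trans (by apply max_le <;> omega)
      exact h2.trans (le_max_right _ _)
  | case4 sum inH np rest hg ih =>
    intro hIn hOut hDOut hsub
    have hsub' : (([] : List Int) : Multiset Int) ≤ (rest : Multiset Int) := by simp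
    have out := ih (hpush_sorted hIn (-np)) hOut.of_cons hDOut hsub'
    have hl : liveIn (np :: rest) [] = np ::ₘ liveIn rest [] := live_cons hsub'
    have hdiff : liveIn (np :: rest) []
        - liveIn (modLoop1 k dInLen (sum + np) (hpush inH (-np)) rest []).2.2.1
                 (modLoop1 k dInLen (sum + np) (hpush inH (-np)) rest []).2.2.2
        = np ::ₘ (liveIn rest []
        - liveIn (modLoop1 k dInLen (sum + np) (hpush inH (-np)) rest []).2.2.1
                 (modLoop1 k dInLen (sum + np) (hpush inH (-np)) rest []).2.2.2) := by
      rw [hl, sub_cons_of_le out.hle]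
    have hplen : ((hpush inH (-np)).length : Int) = (inH.length : Int) + 1 := by
      rw [hpush]; rw [List.orderedInsert_length]; push_cast; ring
    refine ⟨out.sIn, out.sOut, out.sDOut, out.sub, ?_, ?_, ?_, ?_, out.hstop, ?_⟩
    · exact out.hle.trans (by rw [hl]; exact Multiset.le_cons_self _ _)
    · rw [hdiff, negM_cons, out.hin, hpush_coe]
      ext x
      simp [Multiset.count_add, Multiset.count_cons, List.count_cons]
      split_ifs <;> omega
    · have h1 := out.hsum
      rw [hdiff, Multiset.sum_cons]
      omega
    · intro b hb m hm
      rw [hdiff, Multiset.mem_cons] at hm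
      rcases hm with rfl | hm
      · have hb' : b ∈ (rest : Multiset Int) :=
          Multiset.mem_of_le ((out.hle).trans (live_le_list _ _)) hb
        exact sorted_head_le hOut rfl (by rw [coe_cons_ms]; exact Multiset.mem_cons_of_mem hb')
      · exact out.hmoved b hb m hm
    · have h1 := out.hbound
      rw [hplen] at h1
      have h2 : (modLoop1 k dInLen (sum + np) (hpush inH (-np)) rest []).2.1.length
          - (dInLen : Int) ≤ k := h1.trans (by apply max_le <;> omega)
      exact h2.trans (le_max_right _ _)
  | case5 sum inH dOut np rest hg =>
    intro hIn hOut hDOut hsub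
    have hz : liveIn (np :: rest) dOut - liveIn (np :: rest) dOut = 0 := by simp
    refine ⟨hIn, hOut, hDOut, hsub, le_rfl, by rw [hz]; simp [negM], by rw [hz]; simp,
            by rw [hz]; intro b _ m hm; simp at hm,
            Or.inl (show k ≤ ((inH.length : Int)) - (dInLen : Int) by omega), le_max_left _ _⟩

-- ---- loop 2 ----
structure L2Out (k : Int) (sum : Int) (inH outH dIn : List Int)
    (res : Int × List Int × List Int × List Int) : Prop where
  sIn : res.2.1.Pairwise (· ≤ ·)
  sOut : res.2.2.1.Pairwise (· ≤ ·)
  sDIn : res.2.2.2.Pairwise (· ≤ ·)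
  sub : (res.2.2.2 : Multiset Int) ≤ (res.2.1 : Multiset Int)
  hle : liveIn res.2.1 res.2.2.2 ≤ liveIn inH dIn
  hout : (res.2.2.1 : Multiset Int) =
    (outH : Multiset Int) + negM (liveIn inH dIn - liveIn res.2.1 res.2.2.2)
  hsum : res.1 = sum + (liveIn inH dIn - liveIn res.2.1 res.2.2.2).sum
  hmoved : ∀ a ∈ liveIn res.2.1 res.2.2.2, ∀ m ∈ liveIn inH dIn - liveIn res.2.1 res.2.2.2, m ≤ a
  hcard : (liveIn res.2.1 res.2.2.2).card = min k.toNat (liveIn inH dIn).card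

lemma modLoop2_spec (k : Int) (sum : Int) (inH outH dIn : List Int) (hk : 0 ≤ k)
    (hIn : inH.Pairwise (· ≤ ·)) (hOut : outH.Pairwise (· ≤ ·)) (hDIn : dIn.Pairwise (· ≤ ·))
    (hsub : (dIn : Multiset Int) ≤ (inH : Multiset Int)) :
    L2Out k sum inH outH dIn (modLoop2 k sum inH outH dIn) := by
  revert hIn hOut hDIn hsub
  fun_induction modLoop2 k sum inH outH dIn with
  | case1 sum outH dIn hg =>
    intro hIn hOut hDIn hsub
    exfalso
    simp at hg
    omega
  | case2 sum outH np rest dq dqrest heq hg ih =>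
    intro hIn hOut hDIn hsub
    have hnp : np = dq := by omega
    subst hnp
    have hsub' : (dqrest : Multiset Int) ≤ (rest : Multiset Int) := by
      have h2 : (np ::ₘ (dqrest : Multiset Int)) ≤ (np ::ₘ (rest : Multiset Int)) := by
        rw [← coe_cons_ms, ← coe_cons_ms]; exact hsub
      exact (Multiset.cons_le_cons_iff np).1 h2
    have out := ih hIn.of_cons hOut hDIn.of_cons hsub'
    have hl : liveIn (np :: rest) (np :: dqrest) = liveIn rest dqrest := live_cons_cons _ _ _
    exact ⟨out.sIn, out.sOut, out.sDIn, out.sub, hl ▸ out.hle, hl ▸ out.hout,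
           hl ▸ out.hsum, hl ▸ out.hmoved, hl ▸ out.hcard⟩
  | case3 sum outH np rest dq dqrest hne hg ih =>
    intro hIn hOut hDIn hsub
    have hne' : np ≠ dq := by omega
    have hsub' : ((dq :: dqrest : List Int) : Multiset Int) ≤ (rest : Multiset Int) :=
      dsub_tail hIn hDIn hsub hne'
    have out := ih hIn.of_cons (hpush_sorted hOut (-np)) hDIn hsub'
    have hl : liveIn (np :: rest) (dq :: dqrest) = np ::ₘ liveIn rest (dq :: dqrest) :=
      live_cons hsub'
    have hdiff : liveIn (np :: rest) (dq :: dqrest)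
        - liveIn (modLoop2 k (sum - -np) rest (hpush outH (-np)) (dq :: dqrest)).2.1
                 (modLoop2 k (sum - -np) rest (hpush outH (-np)) (dq :: dqrest)).2.2.2
        = np ::ₘ (liveIn rest (dq :: dqrest)
        - liveIn (modLoop2 k (sum - -np) rest (hpush outH (-np)) (dq :: dqrest)).2.1
                 (modLoop2 k (sum - -np) rest (hpush outH (-np)) (dq :: dqrest)).2.2.2) := by
      rw [hl, sub_cons_of_le out.hle]
    refine ⟨out.sIn, out.sOut, out.sDIn, out.sub, ?_, ?_, ?_, ?_, ?_⟩
    · exact out.hle.trans (by rw [hl]; exact Multiset.le_cons_self _ _)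
    · rw [hdiff, negM_cons, out.hout, hpush_coe]
      ext x
      simp [Multiset.count_add, Multiset.count_cons, List.count_cons]
      split_ifs <;> omega
    · have h1 := out.hsum
      rw [hdiff, Multiset.sum_cons]
      omega
    · intro a ha m hm
      rw [hdiff, Multiset.mem_cons] at hm
      rcases hm with rfl | hm
      · have ha' : a ∈ (rest : Multiset Int) :=
          Multiset.mem_of_le ((out.hle).trans (live_le_list _ _)) ha
        exact sorted_head_le hIn rfl (by rw [coe_cons_ms]; exact Multiset.mem_cons_of_mem ha')
      · exact out.hmoved a ha m hm
    · have h1 := out.hcard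
      have hco : (liveIn (np :: rest) (dq :: dqrest)).card
          = (np :: rest).length - (dq :: dqrest).length := live_card hsub
      have hcr : (liveIn rest (dq :: dqrest)).card = rest.length - (dq :: dqrest).length :=
        live_card hsub'
      have hlen1 : (dq :: dqrest).length ≤ (np :: rest).length := by
        have := Multiset.card_le_card hsub; simpa using this
      have hlen2 : (dq :: dqrest).length ≤ rest.length := by
        have := Multiset.card_le_card hsub'; simpa using this
      simp only [List.length_cons] at hco hcr hlen1 hg
      omega
  | case4 sum outH np rest hg ih =>
    intro hIn hOut hDIn hsub
    have hsub' : (([] : List Int) : Multiset Int) ≤ (rest : Multiset Int) := by simp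
    have out := ih hIn.of_cons (hpush_sorted hOut (-np)) hDIn hsub'
    have hl : liveIn (np :: rest) [] = np ::ₘ liveIn rest [] := live_cons hsub'
    have hdiff : liveIn (np :: rest) []
        - liveIn (modLoop2 k (sum - -np) rest (hpush outH (-np)) []).2.1
                 (modLoop2 k (sum - -np) rest (hpush outH (-np)) []).2.2.2
        = np ::ₘ (liveIn rest []
        - liveIn (modLoop2 k (sum - -np) rest (hpush outH (-np)) []).2.1
                 (modLoop2 k (sum - -np) rest (hpush outH (-np)) []).2.2.2) := by
      rw [hl, sub_cons_of_le out.hle]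
    refine ⟨out.sIn, out.sOut, out.sDIn, out.sub, ?_, ?_, ?_, ?_, ?_⟩
    · exact out.hle.trans (by rw [hl]; exact Multiset.le_cons_self _ _)
    · rw [hdiff, negM_cons, out.hout, hpush_coe]
      ext x
      simp [Multiset.count_add, Multiset.count_cons, List.count_cons]
      split_ifs <;> omega
    · have h1 := out.hsum
      rw [hdiff, Multiset.sum_cons]
      omega
    · intro a ha m hm
      rw [hdiff, Multiset.mem_cons] at hm
      rcases hm with rfl | hm
      · have ha' : a ∈ (rest : Multiset Int) :=
          Multiset.mem_of_le ((out.hle).trans (live_le_list _ _)) ha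
        exact sorted_head_le hIn rfl (by rw [coe_cons_ms]; exact Multiset.mem_cons_of_mem ha')
      · exact out.hmoved a ha m hm
    · have h1 := out.hcard
      have hco : (liveIn (np :: rest) []).card = (np :: rest).length - ([] : List Int).length :=
        live_card hsub
      have hcr : (liveIn rest []).card = rest.length - ([] : List Int).length :=
        live_card hsub'
      simp only [List.length_cons, List.length_nil] at hco hcr hg
      omega
  | case5 sum inH outH dIn hg =>
    intro hIn hOut hDIn hsub
    have hz : liveIn inH dIn - liveIn inH dIn = 0 := by simp
    refine ⟨hIn, hOut, hDIn, hsub, le_rfl, by rw [hz]; simp [negM], by rw [hz]; simp,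
            by rw [hz]; intro a _ m hm; simp at hm, ?_⟩
    show (liveIn inH dIn).card = min k.toNat (liveIn inH dIn).card
    have hcardle : (liveIn inH dIn).card = inH.length - dIn.length := live_card hsub
    have hlen : dIn.length ≤ inH.length := by
      have := Multiset.card_le_card hsub; simpa using this
    simp at hg
    omega

-- ---- loop 3 ----
structure L3Out (inH dIn : List Int) (res : List Int × List Int) : Prop where
  sIn : res.1.Pairwise (· ≤ ·)
  sDIn : res.2.Pairwise (· ≤ ·)
  sub : (res.2 : Multiset Int) ≤ (res.1 : Multiset Int)
  hlive : liveIn res.1 res.2 = liveIn inH dIn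
  hlen : (res.1.length : Int) - (res.2.length : Int) = (inH.length : Int) - (dIn.length : Int)
  hclean : ∀ d ∈ res.2, ∃ h t, res.1 = h :: t ∧ h < d

lemma modLoop3_spec (inH dIn : List Int)
    (hIn : inH.Pairwise (· ≤ ·)) (hDIn : dIn.Pairwise (· ≤ ·))
    (hsub : (dIn : Multiset Int) ≤ (inH : Multiset Int)) :
    L3Out inH dIn (modLoop3 inH dIn) := by
  fun_induction modLoop3 inH dIn with
  | case1 dqrest p prest ih =>
    have hsub' : (dqrest : Multiset Int) ≤ (prest : Multiset Int) := by
      have : (p ::ₘ (dqrest : Multiset Int)) ≤ (p ::ₘ (prest : Multiset Int)) := by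
        simpa using hsub
      exact (Multiset.cons_le_cons_iff p).1 this
    have out := ih (List.Pairwise.of_cons hIn) (List.Pairwise.of_cons hDIn) hsub'
    refine ⟨out.sIn, out.sDIn, out.sub, ?_, by have := out.hlen; simp; omega, out.hclean⟩
    rw [out.hlive]
    unfold liveIn
    have h1 : ((p :: prest : List Int) : Multiset Int) = p ::ₘ (prest : Multiset Int) := by simp
    have h2 : ((p :: dqrest : List Int) : Multiset Int) = p ::ₘ (dqrest : Multiset Int) := by simp
    rw [h1, h2, cons_sub_cons_ms]
  | case2 dq dqrest p prest hne =>
    have hdq : dq ∈ (( p :: prest : List Int) : Multiset Int) := by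
      apply Multiset.mem_of_le hsub; simp
    have hple : p ≤ dq := sorted_head_le hIn rfl hdq
    refine ⟨hIn, hDIn, hsub, rfl, by simp, ?_⟩
    intro d hd
    refine ⟨p, prest, rfl, ?_⟩
    have : dq ≤ d := by
      rcases hd with _ | hd'
      · omega
      · exact (List.pairwise_cons.1 hDIn).1 d (by assumption)
    omega
  | case3 dIn inH hcase =>
    rcases dIn with _ | ⟨dq, dqrest⟩
    · exact ⟨hIn, hDIn, hsub, rfl, by simp, by intro d hd; simp at hd⟩
    · rcases inH with _ | ⟨p, prest⟩
      · exfalso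
        have : dq ∈ (([] : List Int) : Multiset Int) := Multiset.mem_of_le hsub (by simp)
        simp at this
      · exact absurd (hcase dq dqrest p prest rfl rfl) (fun h => h)

-- ---- tkModify: detailed effect ----
structure ModOut (k : Int) (st st' : TK) : Prop where
  hk : st'.k = st.k
  hc : st'.c = st.c
  sIn : st'.inH.Pairwise (· ≤ ·)
  sOut : st'.outH.Pairwise (· ≤ ·)
  sDIn : st'.dIn.Pairwise (· ≤ ·)
  sDOut : st'.dOut.Pairwise (· ≤ ·)
  subIn : (st'.dIn : Multiset Int) ≤ (st'.inH : Multiset Int)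
  subOut : (st'.dOut : Multiset Int) ≤ (st'.outH : Multiset Int)
  hclean : ∀ d ∈ st'.dIn, ∃ h t, st'.inH = h :: t ∧ h < d
  htot : negM (liveIn st'.inH st'.dIn) + liveIn st'.outH st'.dOut
       = negM (liveIn st.inH st.dIn) + liveIn st.outH st.dOut
  hsum : st.sum = (negM (liveIn st.inH st.dIn)).sum →
         st'.sum = (negM (liveIn st'.inH st'.dIn)).sum
  hcard : (liveIn st'.inH st'.dIn).card
        = min k.toNat ((liveIn st.inH st.dIn).card + (liveIn st.outH st.dOut).card)
  hmove :
    (liveIn st'.inH st'.dIn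
       = liveIn st.inH st.dIn + negM (liveIn st.outH st.dOut - liveIn st'.outH st'.dOut) ∧
     liveIn st'.outH st'.dOut ≤ liveIn st.outH st.dOut ∧
     (∀ b ∈ liveIn st'.outH st'.dOut,
        ∀ m ∈ liveIn st.outH st.dOut - liveIn st'.outH st'.dOut, m ≤ b)) ∨
    (liveIn st'.outH st'.dOut
       = liveIn st.outH st.dOut + negM (liveIn st.inH st.dIn - liveIn st'.inH st'.dIn) ∧
     liveIn st'.inH st'.dIn ≤ liveIn st.inH st.dIn ∧
     (∀ a ∈ liveIn st'.inH st'.dIn,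
        ∀ m ∈ liveIn st.inH st.dIn - liveIn st'.inH st'.dIn, m ≤ a))

lemma tkModify_spec (st : TK) (hk : 0 ≤ st.k)
    (sIn : st.inH.Pairwise (· ≤ ·)) (sOut : st.outH.Pairwise (· ≤ ·))
    (sDIn : st.dIn.Pairwise (· ≤ ·)) (sDOut : st.dOut.Pairwise (· ≤ ·))
    (subIn : (st.dIn : Multiset Int) ≤ (st.inH : Multiset Int))
    (subOut : (st.dOut : Multiset Int) ≤ (st.outH : Multiset Int)) :
    ModOut st.k st (tkModify st) := by
  have o1 := modLoop1_spec st.k st.dIn.length st.sum st.inH st.outH st.dOut sIn sOut sDOut subOut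
  set r1 := modLoop1 st.k st.dIn.length st.sum st.inH st.outH st.dOut with hr1
  have sub2 : (st.dIn : Multiset Int) ≤ (r1.2.1 : Multiset Int) := by
    rw [o1.hin]; exact subIn.trans (Multiset.le_add_right _ _)
  have o2 := modLoop2_spec st.k r1.1 r1.2.1 r1.2.2.1 st.dIn hk o1.sIn o1.sOut sDIn sub2
  set r2 := modLoop2 st.k r1.1 r1.2.1 r1.2.2.1 st.dIn with hr2
  have o3 := modLoop3_spec r2.2.1 r2.2.2.2 o2.sIn o2.sDIn o2.sub
  set r3 := modLoop3 r2.2.1 r2.2.2.2 with hr3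
  have hst' : tkModify st =
      { st with sum := r2.1, inH := r3.1, outH := r2.2.2.1, dIn := r3.2, dOut := r1.2.2.2 } := by
    rw [tkModify]
  set LI0 := liveIn st.inH st.dIn with hLI0
  set LO0 := liveIn st.outH st.dOut with hLO0
  set LO1 := liveIn r1.2.2.1 r1.2.2.2 with hLO1
  set LI1 := liveIn r1.2.1 st.dIn with hLI1
  set LI2 := liveIn r2.2.1 r2.2.2.2 with hLI2
  set M1 := LO0 - LO1 with hM1
  set M2 := LI1 - LI2 with hM2
  have hLI1eq : LI1 = LI0 + negM M1 := by
    rw [hLI1, hLI0]; unfold liveIn; rw [o1.hin, sub_add_comm_ms _ subIn]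
  have subOutFin : (r1.2.2.2 : Multiset Int) ≤ (r2.2.2.1 : Multiset Int) := by
    rw [o2.hout]; exact o1.sub.trans (Multiset.le_add_right _ _)
  have hLOfin : liveIn r2.2.2.1 r1.2.2.2 = LO1 + negM M2 := by
    rw [hLO1]; unfold liveIn; rw [o2.hout, sub_add_comm_ms _ o1.sub]
  have hLIfin : liveIn r3.1 r3.2 = LI2 := o3.hlive
  have hLI1split : LI2 + M2 = LI1 := add_tsub_cancel_of_le o2.hle
  have hLO0split : LO1 + M1 = LO0 := add_tsub_cancel_of_le o1.hle
  have htot : negM (liveIn r3.1 r3.2) + liveIn r2.2.2.1 r1.2.2.2 = negM LI0 + LO0 := by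
    rw [hLIfin, hLOfin]
    have e1 : negM LI2 + negM M2 = negM LI1 := by rw [← negM_add, hLI1split]
    have e2 : negM LI1 = negM LI0 + M1 := by rw [hLI1eq, negM_add, negM_negM]
    calc negM LI2 + (LO1 + negM M2) = (negM LI2 + negM M2) + LO1 := by abel
      _ = (negM LI0 + M1) + LO1 := by rw [e1, e2]
      _ = negM LI0 + (LO1 + M1) := by abel
      _ = negM LI0 + LO0 := by rw [hLO0split]
  -- cards
  have hcard0 : LI0.card = st.inH.length - st.dIn.length := live_card subIn
  have hcard1 : LI1.card = r1.2.1.length - st.dIn.length := live_card sub2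
  have hdle0 : st.dIn.length ≤ st.inH.length := by
    have := Multiset.card_le_card subIn; simpa using this
  have hdle1 : st.dIn.length ≤ r1.2.1.length := by
    have := Multiset.card_le_card sub2; simpa using this
  have hM1card : LI1.card = LI0.card + M1.card := by
    rw [hLI1eq, Multiset.card_add, negM_card]
  have hM1card' : LO0.card = LO1.card + M1.card := by
    rw [← hLO0split, Multiset.card_add]
  have hstop : st.k.toNat ≤ LI1.card ∨ LO1.card = 0 := by
    rcases o1.hstop with h | h
    · left; omega
    · right; rw [hLO1, h]; simp
  have hbound : LI1.card ≤ LI0.card ∨ LI1.card ≤ st.k.toNat := by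
    rcases le_max_iff.1 o1.hbound with h | h
    · left; omega
    · right; omega
  have hcardfin : LI2.card = min st.k.toNat (LI0.card + LO0.card) := by
    have h2 := o2.hcard
    rw [← hLI1, ← hLI2] at h2
    rcases hstop with h | h <;> omega
  -- the moved-elements disjunction
  have hM2zero : M1 ≠ 0 → M2 = 0 := by
    intro h1
    have hm1pos : 0 < M1.card := Multiset.card_pos.2 h1
    have hli1le : LI1.card ≤ st.k.toNat := by rcases hbound with h | h <;> omega
    have : M2.card = 0 := by
      have h2 := o2.hcard
      have hc2 := card_sub_of_le o2.hle
      rw [← hLI1, ← hLI2] at h2 hc2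
      rw [← hM2] at hc2
      omega
    exact Multiset.card_eq_zero.mp this
  rw [hst']
  refine ⟨rfl, rfl, o3.sIn, o2.sOut, o3.sDIn, o1.sDOut, o3.sub, subOutFin, o3.hclean,
          htot, ?_, by rw [hLIfin]; exact hcardfin, ?_⟩
  · intro hs
    have h1 : r1.1 = st.sum + M1.sum := by
      have := o1.hsum; rw [← hLO0, ← hLO1, ← hM1] at this; exact this
    have h2 : r2.1 = r1.1 + M2.sum := by
      have := o2.hsum; rw [← hLI1, ← hLI2, ← hM2] at this; exact this
    have hsum1 : LI1.sum = LI0.sum + (negM M1).sum := by rw [hLI1eq, Multiset.sum_add]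
    have hsum2 : LI2.sum + M2.sum = LI1.sum := by rw [← Multiset.sum_add, hLI1split]
    have hnm1 : (negM M1).sum = -M1.sum := negM_sum _
    have hnLI0 : (negM LI0).sum = -LI0.sum := negM_sum _
    have hnLI2 : (negM LI2).sum = -LI2.sum := negM_sum _
    show r2.1 = (negM (liveIn r3.1 r3.2)).sum
    rw [hLIfin, hnLI2]
    rw [hnLI0] at hs
    omega
  · by_cases hM1z : M1 = 0
    · -- loop 1 moved nothing: the in→out disjunct
      right
      have hLO0eq : LO1 = LO0 := by rw [← hLO0split, hM1z, add_zero]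
      have hLI1eq' : LI1 = LI0 := by rw [hLI1eq, hM1z]; simp [negM]
      have hle' := o2.hle
      rw [← hLI1, ← hLI2] at hle'
      refine ⟨?_, ?_, ?_⟩
      · rw [hLIfin, hLOfin, hLO0eq, ← hLO0, ← hLI0, ← hLI1eq', hM2]
      · rw [hLIfin, ← hLI0, ← hLI1eq']; exact hle'
      · rw [hLIfin, ← hLI0, ← hLI1eq']
        intro a ha m hm
        have hmv := o2.hmoved a
        rw [← hLI1, ← hLI2] at hmv
        exact hmv ha m hm
    · -- loop 1 moved, loop 2 must be a no-op: the out→in disjunct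
      left
      have hM2z : M2 = 0 := hM2zero hM1z
      have hLI2eq : LI2 = LI1 := by rw [← hLI1split, hM2z, add_zero]
      have hLOfin' : liveIn r2.2.2.1 r1.2.2.2 = LO1 := by rw [hLOfin, hM2z]; simp [negM]
      have hle' := o1.hle
      rw [← hLO0, ← hLO1] at hle'
      refine ⟨?_, ?_, ?_⟩
      · rw [hLIfin, hLOfin', ← hLI0, ← hLO0, ← hM1, hLI2eq, hLI1eq]
      · rw [hLOfin', ← hLO0]; exact hle'
      · rw [hLOfin', ← hLO0]
        intro b hb m hm
        have hmv := o1.hmoved b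
        rw [← hLO0, ← hLO1] at hmv
        exact hmv hb m hm

-- order is preserved by tkModify when it holds fully on entry
lemma ModOut_order {k : Int} {st st' : TK} (mo : ModOut k st st')
    (h : ∀ a ∈ liveIn st.inH st.dIn, ∀ b ∈ liveIn st.outH st.dOut, -a ≤ b) :
    ∀ a ∈ liveIn st'.inH st'.dIn, ∀ b ∈ liveIn st'.outH st'.dOut, -a ≤ b := by
  intro a ha b hb
  rcases mo.hmove with ⟨hin', hleO, hmv⟩ | ⟨hout', hleI, hmv⟩
  · rw [hin'] at ha
    rcases Multiset.mem_add.1 ha with ha' | ha'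
    · exact h a ha' b (Multiset.mem_of_le hleO hb)
    · have hm : -a ∈ liveIn st.outH st.dOut - liveIn st'.outH st'.dOut := mem_negM.1 ha'
      have := hmv b hb (-a) hm
      omega
  · rw [hout'] at hb
    rcases Multiset.mem_add.1 hb with hb' | hb'
    · exact h a (Multiset.mem_of_le hleI ha) b hb'
    · have hm : -b ∈ liveIn st.inH st.dIn - liveIn st'.inH st'.dIn := mem_negM.1 hb'
      have := hmv a ha (-b) hm
      omega

lemma cons_le_of_mem_sub {x : Int} {A B : Multiset Int} (h : B ≤ A) (hx : x ∈ A - B) :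
    (x ::ₘ B) ≤ A := by
  rw [Multiset.le_iff_count]
  intro y
  have h1 := Multiset.le_iff_count.1 h y
  have h2 : 1 ≤ Multiset.count x (A - B) := Multiset.one_le_count_iff_mem.2 hx
  rw [Multiset.count_sub] at h2
  rw [Multiset.count_cons]
  split_ifs with hyx
  · subst hyx; omega
  · omega

lemma sub_cons_eq_erase_sub {x : Int} {A B : Multiset Int} (hx : x ∈ A - B) :
    A - (x ::ₘ B) = (A - B).erase x := by
  ext y
  by_cases hyx : y = x
  · subst hyx
    rw [Multiset.count_erase_self, Multiset.count_sub, Multiset.count_sub, Multiset.count_cons_self]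
    omega
  · rw [Multiset.count_erase_of_ne hyx, Multiset.count_sub, Multiset.count_sub,
        Multiset.count_cons_of_ne hyx]

lemma negM_erase {y : Int} {s : Multiset Int} (hy : y ∈ s) :
    negM (s.erase y) = (negM s).erase (-y) := by
  have h1 : s = y ::ₘ s.erase y := (Multiset.cons_erase hy).symm
  have h2 : negM s = -y ::ₘ negM (s.erase y) := by
    conv_lhs => rw [h1]
    exact negM_cons _ _
  rw [h2, Multiset.erase_cons_head]

lemma sub_tail_of_not_mem {p : Int} {rest dl : List Int}
    (hsub : (dl : Multiset Int) ≤ ((p :: rest : List Int) : Multiset Int))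
    (hp : Multiset.count p (dl : Multiset Int) = 0) :
    (dl : Multiset Int) ≤ (rest : Multiset Int) := by
  rw [Multiset.le_iff_count] at hsub ⊢
  intro y
  have := hsub y
  rw [coe_cons_ms, Multiset.count_cons] at this
  by_cases hyp : y = p
  · subst hyp; omega
  · rw [if_neg hyp] at this; omega

-- ---- add and discard preserve TKInv ----
lemma inv_init (k : Int) (hk : 0 ≤ k) : TKInv k 0 (tkInit k) := by
  refine ⟨rfl, by simp [tkInit], by simp [tkInit], by simp [tkInit], by simp [tkInit],
          le_rfl, le_rfl, ?_, ?_, ?_, ?_, ?_, ?_⟩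
  · intro x; simp [tkInit, PySem.Dict.getD_empty]
  · simp [tkInit, liveIn, negM]
  · simp [tkInit, liveIn, negM]
  · simp [tkInit, liveIn]
  · intro a ha; simp [tkInit, liveIn] at ha
  · intro d hd; simp [tkInit] at hd

lemma inv_add {k : Int} {W : Multiset Int} {st : TK} (hk : 0 ≤ k)
    (h : TKInv k W st) (x : Int) : TKInv k (x ::ₘ W) (tkAdd st x) := by
  set st1 : TK := { st with c := st.c.modify x 0 (· + 1),
                            inH := hpush st.inH (-x),
                            sum := st.sum + x } with hst1
  have hAdd : tkAdd st x = tkModify st1 := rfl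
  have hk1 : 0 ≤ st1.k := by show 0 ≤ st.k; rw [h.hk]; exact hk
  have subIn1 : (st1.dIn : Multiset Int) ≤ (st1.inH : Multiset Int) := by
    show (st.dIn : Multiset Int) ≤ (hpush st.inH (-x) : Multiset Int)
    rw [hpush_coe]
    exact h.subIn.trans (Multiset.le_cons_self _ _)
  have mo := tkModify_spec st1 hk1 (hpush_sorted h.sIn (-x)) h.sOut h.sDIn h.sDOut subIn1 h.subOut
  have live1eq : liveIn st1.inH st1.dIn = -x ::ₘ liveIn st.inH st.dIn := by
    show liveIn (hpush st.inH (-x)) st.dIn = -x ::ₘ liveIn st.inH st.dIn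
    unfold liveIn
    rw [hpush_coe, sub_cons_of_le h.subIn]
  have hout1 : liveIn st1.outH st1.dOut = liveIn st.outH st.dOut := rfl
  have hWcard : W.card = (liveIn st.inH st.dIn).card + (liveIn st.outH st.dOut).card := by
    rw [h.hW, Multiset.card_add, negM_card]
  have hk1k : st1.k = k := h.hk
  have hcardF : (liveIn (tkModify st1).inH (tkModify st1).dIn).card
      = min k.toNat ((liveIn st.inH st.dIn).card + 1 + (liveIn st.outH st.dOut).card) := by
    have := mo.hcard
    rw [live1eq, hout1, hk1k] at this
    rw [this, Multiset.card_cons]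
  rw [hAdd]
  refine ⟨by rw [mo.hk]; exact hk1k, mo.sIn, mo.sOut, mo.sDIn, mo.sDOut, mo.subIn, mo.subOut,
          ?_, ?_, ?_, ?_, ?_, mo.hclean⟩
  · -- counts
    intro y
    rw [mo.hc]
    show (st.c.modify x 0 (· + 1)).getD y 0 = ((x ::ₘ W).count y : Int)
    rw [PySem.Dict.getD_modify, Multiset.count_cons]
    by_cases hyx : y = x
    · subst hyx
      rw [if_pos rfl, if_pos rfl, h.counts y]
      try push_cast
      try ring
    · rw [if_neg hyx, if_neg hyx, h.counts y]
      push_cast; ring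
  · -- hW
    rw [mo.htot, live1eq, hout1, negM_cons, Multiset.cons_add, ← h.hW]
    simp
  · -- hsum
    apply mo.hsum
    rw [live1eq, negM_cons, Multiset.sum_cons]
    show st.sum + x = -(-x) + (negM (liveIn st.inH st.dIn)).sum
    rw [h.hsum]
    ring
  · -- hcard
    rw [hcardF, Multiset.card_cons, hWcard]
    omega
  · -- horder
    intro a ha b hb
    rcases mo.hmove with ⟨hin', hleO, hmv⟩ | ⟨hout', hleI, hmv⟩
    · -- loop 1 refilled from out: only possible when out was empty, so vacuous
      by_cases hO : liveIn st.outH st.dOut = 0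
      · have hz : liveIn (tkModify st1).outH (tkModify st1).dOut = 0 := by
          have h2 := hleO
          rw [hout1, hO] at h2
          exact Multiset.le_zero.1 h2
        rw [hz] at hb
        simp at hb
      · exfalso
        have hOpos : 0 < (liveIn st.outH st.dOut).card := Multiset.card_pos.2 hO
        have hl0 : (liveIn st.inH st.dIn).card = k.toNat := by
          have := h.hcard; omega
        have hge : (liveIn st1.inH st1.dIn).card
            ≤ (liveIn (tkModify st1).inH (tkModify st1).dIn).card := by
          rw [hin', Multiset.card_add]; omega
        rw [live1eq, Multiset.card_cons, hcardF] at hge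
        omega
    · -- loop 2 spilled the largest live in-element
      rw [hout', hout1] at hb
      rcases Multiset.mem_add.1 hb with hbO | hbM
      · by_cases hax : a ∈ liveIn st.inH st.dIn
        · exact h.horder a hax b hbO
        · have hOpos : 0 < (liveIn st.outH st.dOut).card :=
            Multiset.card_pos.2 (fun hz => by rw [hz] at hbO; simp at hbO)
          have hl0 : (liveIn st.inH st.dIn).card = k.toNat := by
            have := h.hcard; omega
          have haM : a = -x := by
            have ha1 : a ∈ liveIn st1.inH st1.dIn := Multiset.mem_of_le hleI ha
            rw [live1eq] at ha1
            rcases Multiset.mem_cons.1 ha1 with h' | h'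
            · exact h'
            · exact absurd h' hax
          have hlF : (liveIn (tkModify st1).inH (tkModify st1).dIn).card = k.toNat := by
            rw [hcardF]; omega
          have hl1 : (liveIn st1.inH st1.dIn).card = k.toNat + 1 := by
            rw [live1eq, Multiset.card_cons]; omega
          have hMicard : (liveIn st1.inH st1.dIn
              - liveIn (tkModify st1).inH (tkModify st1).dIn).card = 1 := by
            rw [card_sub_of_le hleI]; omega
          obtain ⟨m, hm⟩ := Multiset.card_eq_one.1 hMicard
          have hmmem : m ∈ liveIn st1.inH st1.dIn
              - liveIn (tkModify st1).inH (tkModify st1).dIn := by rw [hm]; simp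
          have hm_ne : m ≠ -x := by
            intro he
            have hcnt : Multiset.count (-x) (liveIn st1.inH st1.dIn
                - liveIn (tkModify st1).inH (tkModify st1).dIn) = 0 := by
              rw [Multiset.count_sub]
              have c1 : Multiset.count (-x) (liveIn st1.inH st1.dIn)
                  = Multiset.count (-x) (liveIn st.inH st.dIn) + 1 := by
                rw [live1eq, Multiset.count_cons_self]
              have c0 : Multiset.count (-x) (liveIn st.inH st.dIn) = 0 := by
                rw [← haM]
                exact Multiset.count_eq_zero.2 hax
              have c2 : 1 ≤ Multiset.count (-x)
                  (liveIn (tkModify st1).inH (tkModify st1).dIn) := by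
                apply Multiset.one_le_count_iff_mem.2
                rw [← haM]; exact ha
              omega
            rw [he] at hmmem
            have := Multiset.one_le_count_iff_mem.2 hmmem
            omega
          have hm1 : m ∈ liveIn st1.inH st1.dIn :=
            Multiset.mem_of_le (Multiset.sub_le_self _ _) hmmem
          have hm0 : m ∈ liveIn st.inH st.dIn := by
            rw [live1eq] at hm1
            rcases Multiset.mem_cons.1 hm1 with h' | h'
            · exact absurd h' hm_ne
            · exact h'
          have h1 : -m ≤ b := h.horder m hm0 b hbO
          have h2 : m ≤ a := hmv a ha m hmmem
          omega
      · have hmem : -b ∈ liveIn st1.inH st1.dIn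
            - liveIn (tkModify st1).inH (tkModify st1).dIn := mem_negM.1 hbM
        have := hmv a ha (-b) hmem
        omega

lemma sum_erase_mem {s : Multiset Int} {x : Int} (h : x ∈ s) : (s.erase x).sum = s.sum - x := by
  have h1 := Multiset.cons_erase h
  have h2 : (x ::ₘ s.erase x).sum = s.sum := by rw [h1]
  rw [Multiset.sum_cons] at h2
  omega

lemma counts_dec {W : Multiset Int} {d : PySem.Dict Int Int} {x : Int}
    (hc : ∀ y, d.getD y 0 = (W.count y : Int)) (hx : x ∈ W) :
    ∀ y, (d.modify x 0 (· - 1)).getD y 0 = ((W.erase x).count y : Int) := by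
  intro y
  rw [PySem.Dict.getD_modify]
  by_cases hyx : y = x
  · subst hyx
    rw [if_pos rfl, hc y, Multiset.count_erase_self]
    have := Multiset.one_le_count_iff_mem.2 hx
    omega
  · rw [if_neg hyx, hc y, Multiset.count_erase_of_ne hyx]

-- discarding an element that lives on the out side
lemma inv_discard_out {k : Int} {W : Multiset Int} {st : TK} (hk : 0 ≤ k)
    (h : TKInv k W st) {x : Int} (hx : x ∈ W) (hxo : x ∈ liveIn st.outH st.dOut) :
    TKInv k (W.erase x)
      (tkModify { st with c := st.c.modify x 0 (· - 1), dOut := hpush st.dOut x }) := by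
  set st1 : TK := { st with c := st.c.modify x 0 (· - 1), dOut := hpush st.dOut x } with hst1
  have hk1 : 0 ≤ st1.k := by show 0 ≤ st.k; rw [h.hk]; exact hk
  have subOut1 : (st1.dOut : Multiset Int) ≤ (st1.outH : Multiset Int) := by
    show (hpush st.dOut x : Multiset Int) ≤ (st.outH : Multiset Int)
    rw [hpush_coe]
    exact cons_le_of_mem_sub h.subOut hxo
  have mo := tkModify_spec st1 hk1 h.sIn h.sOut h.sDIn (hpush_sorted h.sDOut x) h.subIn subOut1
  have live1 : liveIn st1.inH st1.dIn = liveIn st.inH st.dIn := rfl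
  have out1 : liveIn st1.outH st1.dOut = (liveIn st.outH st.dOut).erase x := by
    show liveIn st.outH (hpush st.dOut x) = _
    unfold liveIn
    rw [hpush_coe]
    exact sub_cons_eq_erase_sub hxo
  have hk1k : st1.k = k := h.hk
  have hWcard : W.card = (liveIn st.inH st.dIn).card + (liveIn st.outH st.dOut).card := by
    rw [h.hW, Multiset.card_add, negM_card]
  refine ⟨by rw [mo.hk]; exact hk1k, mo.sIn, mo.sOut, mo.sDIn, mo.sDOut, mo.subIn, mo.subOut,
          ?_, ?_, ?_, ?_, ?_, mo.hclean⟩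
  · intro y
    rw [mo.hc]
    exact counts_dec h.counts hx y
  · rw [mo.htot, live1, out1, h.hW, Multiset.erase_add_right_pos _ hxo]
  · apply mo.hsum
    exact h.hsum
  · have := mo.hcard
    rw [live1, out1, hk1k] at this
    rw [this, Multiset.card_erase_of_mem hxo, Multiset.card_erase_of_mem hx, hWcard]
    have : 0 < (liveIn st.outH st.dOut).card := Multiset.card_pos.2 (fun hz => by rw [hz] at hxo; simp at hxo)
    simp only [Nat.pred_eq_sub_one]
    omega
  · apply ModOut_order mo
    intro a ha b hb
    rw [out1] at hb
    exact h.horder a ha b (Multiset.mem_of_le (Multiset.erase_le _ _) hb)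

lemma inv_discard {k : Int} {W : Multiset Int} {st : TK} (hk : 0 ≤ k)
    (h : TKInv k W st) {x : Int} (hx : x ∈ W) : TKInv k (W.erase x) (tkDiscard st x) := by
  have hc0 : ¬ (st.c.getD x 0 = 0) := by
    rw [h.counts x]
    have := Multiset.one_le_count_iff_mem.2 hx
    intro hcontra
    omega
  unfold tkDiscard
  rw [if_neg hc0]
  split
  next p rest hin =>
    -- p is the largest element still stored on the in side; it is live
    have hpd : Multiset.count p (st.dIn : Multiset Int) = 0 := by
      rw [Multiset.count_eq_zero]
      intro hm
      obtain ⟨hh, tt, hht, hlt⟩ := h.hclean p (by simpa using hm)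
      rw [hin] at hht
      injection hht with h1 _
      omega
    have subIn' : (st.dIn : Multiset Int) ≤ (rest : Multiset Int) :=
      sub_tail_of_not_mem (hin ▸ h.subIn) hpd
    have hlive0 : liveIn st.inH st.dIn = p ::ₘ liveIn rest st.dIn := by
      unfold liveIn
      rw [hin, coe_cons_ms, sub_cons_of_le subIn']
    have hpl : p ∈ liveIn st.inH st.dIn := by rw [hlive0]; simp
    split_ifs with hpx hpgt
    · -- branch 1: x is the head (largest live in-element); pop it
      set st1 : TK := { st with c := st.c.modify x 0 (· - 1), sum := st.sum - x, inH := rest } with hst1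
      have hk1 : 0 ≤ st1.k := by show 0 ≤ st.k; rw [h.hk]; exact hk
      have sIn1 : st1.inH.Pairwise (· ≤ ·) := by
        show rest.Pairwise (· ≤ ·)
        have := h.sIn; rw [hin] at this; exact this.of_cons
      have mo := tkModify_spec st1 hk1 sIn1 h.sOut h.sDIn h.sDOut subIn' h.subOut
      have live1 : liveIn st1.inH st1.dIn = liveIn rest st.dIn := rfl
      have out1 : liveIn st1.outH st1.dOut = liveIn st.outH st.dOut := rfl
      have hk1k : st1.k = k := h.hk
      have hWsplit : W = x ::ₘ (negM (liveIn rest st.dIn) + liveIn st.outH st.dOut) := by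
        rw [h.hW, hlive0, negM_cons, Multiset.cons_add, hpx]
      have hWcard : W.card = (liveIn st.inH st.dIn).card + (liveIn st.outH st.dOut).card := by
        rw [h.hW, Multiset.card_add, negM_card]
      refine ⟨by rw [mo.hk]; exact hk1k, mo.sIn, mo.sOut, mo.sDIn, mo.sDOut, mo.subIn, mo.subOut,
              ?_, ?_, ?_, ?_, ?_, mo.hclean⟩
      · intro y
        rw [mo.hc]
        exact counts_dec h.counts hx y
      · rw [mo.htot, live1, out1, hWsplit, Multiset.erase_cons_head]
      · apply mo.hsum
        show st.sum - x = (negM (liveIn rest st.dIn)).sum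
        have h1 : (negM (liveIn st.inH st.dIn)).sum
            = x + (negM (liveIn rest st.dIn)).sum := by
          rw [hlive0, negM_cons, Multiset.sum_cons, hpx]
        have h2 := h.hsum
        omega
      · have := mo.hcard
        rw [live1, out1, hk1k] at this
        rw [this, Multiset.card_erase_of_mem hx, hWcard, hlive0, Multiset.card_cons]
        simp only [Nat.pred_eq_sub_one]
        omega
      · apply ModOut_order mo
        intro a ha b hb
        have ha' : a ∈ liveIn st.inH st.dIn := by
          rw [hlive0]
          exact Multiset.mem_cons_of_mem ha
        exact h.horder a ha' b hb
    · -- branch 2: x < -p, x lives on the in side; lazy-delete it there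
      have hxin : -x ∈ liveIn st.inH st.dIn := by
        have hxW := hx
        rw [h.hW] at hxW
        rcases Multiset.mem_add.1 hxW with h' | h'
        · exact mem_negM.1 h'
        · exfalso
          have := h.horder p hpl x h'
          omega
      set st1 : TK := { st with c := st.c.modify x 0 (· - 1), sum := st.sum - x,
                                dIn := hpush st.dIn (-x) } with hst1
      have hk1 : 0 ≤ st1.k := by show 0 ≤ st.k; rw [h.hk]; exact hk
      have subIn1 : (st1.dIn : Multiset Int) ≤ (st1.inH : Multiset Int) := by
        show (hpush st.dIn (-x) : Multiset Int) ≤ (st.inH : Multiset Int)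
        rw [hpush_coe]
        exact cons_le_of_mem_sub h.subIn hxin
      have mo := tkModify_spec st1 hk1 h.sIn h.sOut (hpush_sorted h.sDIn (-x)) h.sDOut
        subIn1 h.subOut
      have live1 : liveIn st1.inH st1.dIn = (liveIn st.inH st.dIn).erase (-x) := by
        show liveIn st.inH (hpush st.dIn (-x)) = _
        unfold liveIn
        rw [hpush_coe]
        exact sub_cons_eq_erase_sub hxin
      have out1 : liveIn st1.outH st1.dOut = liveIn st.outH st.dOut := rfl
      have hk1k : st1.k = k := h.hk
      have hnege : negM ((liveIn st.inH st.dIn).erase (-x))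
          = (negM (liveIn st.inH st.dIn)).erase x := by
        have := negM_erase hxin
        simpa using this
      have hxneg : x ∈ negM (liveIn st.inH st.dIn) := mem_negM.2 (by simpa using hxin)
      have hWcard : W.card = (liveIn st.inH st.dIn).card + (liveIn st.outH st.dOut).card := by
        rw [h.hW, Multiset.card_add, negM_card]
      refine ⟨by rw [mo.hk]; exact hk1k, mo.sIn, mo.sOut, mo.sDIn, mo.sDOut, mo.subIn, mo.subOut,
              ?_, ?_, ?_, ?_, ?_, mo.hclean⟩
      · intro y
        rw [mo.hc]
        exact counts_dec h.counts hx y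
      · rw [mo.htot, live1, out1, hnege, h.hW, Multiset.erase_add_left_pos _ hxneg]
      · apply mo.hsum
        show st.sum - x = (negM (liveIn st1.inH st1.dIn)).sum
        rw [live1, hnege, sum_erase_mem hxneg, h.hsum]
      · have := mo.hcard
        rw [live1, out1, hk1k] at this
        rw [this, Multiset.card_erase_of_mem hxin, Multiset.card_erase_of_mem hx, hWcard]
        have : 0 < (liveIn st.inH st.dIn).card := Multiset.card_pos.2 (fun hz => by rw [hz] at hxin; simp at hxin)
        simp only [Nat.pred_eq_sub_one]
        omega
      · apply ModOut_order mo
        intro a ha b hb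
        rw [live1] at ha
        exact h.horder a (Multiset.mem_of_le (Multiset.erase_le _ _) ha) b hb
    · -- branch 3: -p < x, so x lives on the out side
      have hxo : x ∈ liveIn st.outH st.dOut := by
        have hxW := hx
        rw [h.hW] at hxW
        rcases Multiset.mem_add.1 hxW with h' | h'
        · exfalso
          have hxin : -x ∈ liveIn st.inH st.dIn := mem_negM.1 h'
          have : -x ∈ (st.inH : Multiset Int) := Multiset.mem_of_le (live_le_list _ _) hxin
          rw [hin] at this
          have hple : p ≤ -x := sorted_head_le (hin ▸ h.sIn) rfl this
          omega
        · exact h'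
      exact inv_discard_out hk h hx hxo
  next hin =>
    -- st.inH = []; everything live sits on the out side
    have hxo : x ∈ liveIn st.outH st.dOut := by
      have hd0 : (st.dIn : Multiset Int) ≤ (([] : List Int) : Multiset Int) := hin ▸ h.subIn
      have hlz : liveIn st.inH st.dIn = 0 := by
        unfold liveIn
        rw [hin]
        exact Multiset.zero_sub _
      have hxW := hx
      rw [h.hW, hlz] at hxW
      simpa [negM] using hxW
    exact inv_discard_out hk h hx hxo

-- ---- the emitted value: sum of the k smallest ----
lemma inv_sum_eq {k : Int} {W : Multiset Int} {st : TK} (hk : 0 ≤ k)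
    (h : TKInv k W st) (l : List Int) (hl : (l : Multiset Int) = W) :
    st.sum = (PySem.List.slice (PySem.List.sorted l (fun x => x) false) none (some k)).sum := by
  rw [PySem.List.slice_to _ hk]
  set sIN := (negM (liveIn st.inH st.dIn)).sort (· ≤ ·) with hsIN
  set sOUT := (liveIn st.outH st.dOut).sort (· ≤ ·) with hsOUT
  have hcoe : ((sIN ++ sOUT : List Int) : Multiset Int) = (l : Multiset Int) := by
    rw [hl]
    have : ((sIN ++ sOUT : List Int) : Multiset Int)
        = (sIN : Multiset Int) + (sOUT : Multiset Int) := by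
      simp
    rw [this, hsIN, hsOUT, Multiset.sort_eq, Multiset.sort_eq, ← h.hW]
  have hperm : (sIN ++ sOUT).Perm l := Multiset.coe_eq_coe.1 hcoe
  have hpair : (sIN ++ sOUT).Pairwise (· ≤ ·) := by
    rw [List.pairwise_append]
    refine ⟨Multiset.pairwise_sort _ _, Multiset.pairwise_sort _ _, ?_⟩
    intro a ha b hb
    rw [hsIN, Multiset.mem_sort] at ha
    rw [hsOUT, Multiset.mem_sort] at hb
    have h2 := h.horder (-a) (by simpa using mem_negM.1 ha) b hb
    omega
  have hseq : PySem.List.sorted l (fun x => x) false = sIN ++ sOUT :=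
    PySem.List.sorted_id_eq_of_perm_of_pairwise (xs := l) (ys := sIN ++ sOUT) hperm hpair
  rw [hseq]
  have hlenIN : sIN.length = min k.toNat W.card := by
    rw [hsIN]
    rw [Multiset.length_sort, negM_card]
    exact h.hcard
  have hsumIN : sIN.sum = (negM (liveIn st.inH st.dIn)).sum := by
    have h1 : ((sIN : List Int) : Multiset Int) = negM (liveIn st.inH st.dIn) := by
      rw [hsIN, Multiset.sort_eq]
    rw [← h1]
    simp
  by_cases hkW : k.toNat ≤ W.card
  · have htake : (sIN ++ sOUT).take k.toNat = sIN := by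
      apply List.take_left'
      omega
    rw [htake, hsumIN, h.hsum]
  · have hcard0 : (liveIn st.inH st.dIn).card = W.card := by
      have := h.hcard; omega
    have hout0 : liveIn st.outH st.dOut = 0 := by
      have hWc : W.card = (liveIn st.inH st.dIn).card + (liveIn st.outH st.dOut).card := by
        rw [h.hW, Multiset.card_add, negM_card]
      have : (liveIn st.outH st.dOut).card = 0 := by omega
      exact Multiset.card_eq_zero.mp this
    have hsOUTnil : sOUT = [] := by
      rw [hsOUT, hout0]
      have : ((Multiset.sort (0 : Multiset Int) (· ≤ ·) : List Int) : Multiset Int) = 0 :=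
        Multiset.sort_eq _ _
      exact (Multiset.coe_eq_zero _).1 this
    have htake : (sIN ++ sOUT).take k.toNat = sIN := by
      rw [hsOUTnil, List.append_nil]
      apply List.take_of_length_le
      omega
    rw [htake, hsumIN, h.hsum]

-- ---- the sliding window ----
def winList (nums : List Int) (ws : Int) (m : Nat) : List Int :=
  (nums.take m).drop (m - ws.toNat)

lemma coe_append_singleton (l : List Int) (v : Int) :
    ((l ++ [v] : List Int) : Multiset Int) = v ::ₘ (l : Multiset Int) := by
  ext y
  simp [List.count_append, List.count_cons]

lemma winList_zero (nums : List Int) (ws : Int) : winList nums ws 0 = [] := by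
  unfold winList
  simp

lemma winList_slice (nums : List Int) (ws : Int) (m : Nat) (h0 : 0 ≤ ws)
    (hemit : ws - 1 ≤ (m : Int)) (hm : m < nums.length) :
    PySem.List.slice nums (some ((m : Int) - ws + 1)) (some ((m : Int) + 1))
      = winList nums ws (m + 1) := by
  rw [PySem.List.slice_toNat nums (by omega) (by omega)]
  unfold winList
  have e1 : ((m : Int) - ws + 1).toNat = (m + 1) - ws.toNat := by omega
  have e2 : ((m : Int) + 1).toNat = m + 1 := by omega
  rw [e1, e2, List.drop_take]

lemma winList_succ_lt (nums : List Int) (ws : Int) (m : Nat) (h0 : 0 ≤ ws)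
    (hws : (m : Int) < ws) (hm : m < nums.length) :
    (winList nums ws (m + 1) : Multiset Int)
      = nums[m] ::ₘ (winList nums ws m : Multiset Int) := by
  unfold winList
  have e1 : m + 1 - ws.toNat = 0 := by omega
  have e2 : m - ws.toNat = 0 := by omega
  rw [e1, e2, List.drop_zero, List.drop_zero, List.take_succ_eq_append_getElem hm,
      coe_append_singleton]

lemma winList_succ_ge (nums : List Int) (ws : Int) (m : Nat) (h0 : 0 ≤ ws)
    (hws : ws ≤ (m : Int)) (hm : m < nums.length) :
    ((nums[m - ws.toNat]'(by omega) : Int)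
        ∈ nums[m] ::ₘ (winList nums ws m : Multiset Int))
    ∧ (nums[m] ::ₘ (winList nums ws m : Multiset Int)).erase (nums[m - ws.toNat]'(by omega))
      = ↑(winList nums ws (m + 1)) := by
  set w := ws.toNat with hw
  have hwm : w ≤ m := by omega
  by_cases hw0 : w = 0
  · have h1 : winList nums ws m = [] := by
      unfold winList
      apply List.drop_eq_nil_of_le
      simp [List.length_take]
      omega
    have h2 : winList nums ws (m + 1) = [] := by
      unfold winList
      apply List.drop_eq_nil_of_le
      simp [List.length_take]
      omega
    have hval : (nums[m - w]'(by omega) : Int) = nums[m]'hm := by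
      congr 1
      omega
    constructor
    · rw [hval, h1]; simp
    · rw [hval, h1, h2]
      simp
  · have hlen : (nums.take m).length = m := by
      simp [List.length_take]
      omega
    have hlt : m - w < (nums.take m).length := by omega
    have hdropcons : (nums.take m).drop (m - w)
        = (nums.take m)[m - w] :: (nums.take m).drop (m - w + 1) :=
      List.drop_eq_getElem_cons hlt
    have hgt : (nums.take m)[m - w]'hlt = nums[m - w]'(by omega) := List.getElem_take
    have hWm : (winList nums ws m : Multiset Int)
        = (nums[m - w]'(by omega)) ::ₘ ↑((nums.take m).drop (m - w + 1)) := by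
      show ((nums.take m).drop (m - w) : Multiset Int) = _
      rw [hdropcons, hgt, coe_cons_ms]
    have hnext : winList nums ws (m + 1) = (nums.take m).drop (m - w + 1) ++ [nums[m]] := by
      unfold winList
      rw [List.take_succ_eq_append_getElem hm]
      have e1 : m + 1 - w = (m - w) + 1 := by omega
      rw [e1, List.drop_append_of_le_length (by omega)]
    constructor
    · rw [hWm]
      exact Multiset.mem_cons_of_mem (Multiset.mem_cons_self _ _)
    · rw [hWm, hnext, Multiset.cons_swap, Multiset.erase_cons_head, coe_append_singleton]

-- the loop bodies of port A and port B, named so the induction states cleanly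
def stepA (nums : List Int) (windowSize : Int) (acc : TK × List Int) (r : Nat) :
    TK × List Int :=
  let ts1 := tkAdd acc.1 (nums.getD r 0)
  let ts2 :=
    if windowSize ≤ (r : Int) then
      match PySem.List.pyGet? nums ((r : Int) - windowSize) with
      | some v => tkDiscard ts1 v
      | none => ts1
    else ts1
  (ts2, if windowSize - 1 ≤ (r : Int) then acc.2 ++ [ts2.sum] else acc.2)

def stepB (nums : List Int) (windowSize k : Int) (res : List Int) (r : Nat) : List Int :=
  if windowSize - 1 ≤ (r : Int) then
    res ++ [(PySem.List.slice
               (PySem.List.sorted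
                 (PySem.List.slice nums (some ((r : Int) - windowSize + 1)) (some ((r : Int) + 1)))
                 (fun x => x) false)
             none (some k)).sum]
  else res

lemma main_inv (nums : List Int) (ws k : Int) (hws : 0 ≤ ws) (hk : 0 ≤ k) (m : Nat)
    (hm : m ≤ nums.length) :
    TKInv k (winList nums ws m : Multiset Int)
        (((List.range m).foldl (stepA nums ws) (tkInit k, [])).1)
    ∧ (((List.range m).foldl (stepA nums ws) (tkInit k, [])).2
        = (List.range m).foldl (stepB nums ws k) []) := by
  induction m with
  | zero =>
    refine ⟨?_, rfl⟩
    rw [winList_zero]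
    exact inv_init k hk
  | succ m ih =>
    have hmlt : m < nums.length := by omega
    obtain ⟨ihInv, ihRes⟩ := ih (by omega)
    rw [List.range_succ, List.foldl_append, List.foldl_append,
        List.foldl_cons, List.foldl_cons, List.foldl_nil, List.foldl_nil]
    set acc := (List.range m).foldl (stepA nums ws) (tkInit k, []) with hacc
    have hv : nums.getD m 0 = nums[m] := List.getD_eq_getElem nums 0 hmlt
    have hInvAdd : TKInv k (nums[m] ::ₘ (winList nums ws m : Multiset Int)) (tkAdd acc.1 (nums.getD m 0)) := by
      rw [hv]
      exact inv_add hk ihInv nums[m]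
    by_cases hwsm : ws ≤ (m : Int)
    · -- the window is full: a discard happens
      have hidxlt : m - ws.toNat < nums.length := by omega
      have hidx : (m : Int) - ws = ((m - ws.toNat : Nat) : Int) := by omega
      have hpg : PySem.List.pyGet? nums ((m : Int) - ws) = some (nums[m - ws.toNat]'hidxlt) := by
        rw [hidx, PySem.List.pyGet?_natCast]
        exact List.getElem?_eq_getElem hidxlt
      obtain ⟨hmem, herase⟩ := winList_succ_ge nums ws m hws hwsm hmlt
      have hInv2 : TKInv k (winList nums ws (m + 1) : Multiset Int)
          (tkDiscard (tkAdd acc.1 (nums.getD m 0)) (nums[m - ws.toNat]'hidxlt)) := by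
        rw [← herase]
        exact inv_discard hk hInvAdd hmem
      have hguard : ws - 1 ≤ (m : Int) := by omega
      simp only [stepA, stepB]
      rw [if_pos hwsm, hpg, if_pos hguard, if_pos hguard]
      refine ⟨hInv2, ?_⟩
      rw [ihRes]
      congr 2
      rw [winList_slice nums ws m hws hguard hmlt]
      exact inv_sum_eq hk hInv2 (winList nums ws (m + 1)) rfl
    · -- the window is still growing: no discard
      have hwm : (m : Int) < ws := by omega
      have hInv2 : TKInv k (winList nums ws (m + 1) : Multiset Int)
          (tkAdd acc.1 (nums.getD m 0)) := by
        rw [winList_succ_lt nums ws m hws hwm hmlt]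
        exact hInvAdd
      simp only [stepA, stepB]
      rw [if_neg hwsm]
      by_cases hguard : ws - 1 ≤ (m : Int)
      · rw [if_pos hguard, if_pos hguard]
        refine ⟨hInv2, ?_⟩
        rw [ihRes]
        congr 2
        rw [winList_slice nums ws m hws hguard hmlt]
        exact inv_sum_eq hk hInv2 (winList nums ws (m + 1)) rfl
      · rw [if_neg hguard, if_neg hguard]
        exact ⟨hInv2, ihRes⟩

-- ===== VERDICT (by name: the statement is the Claim_ definition above) =====
theorem windowTopKSum_spec : Claim_equal_windowTopKSum := by
  intro nums ws k _ hpre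
  unfold Spec_windowTopKSum
  rcases hpre with h0 | ⟨hws, hk⟩
  · subst h0; rfl
  · have h2 := (main_inv nums ws k hws hk nums.length le_rfl).2
    unfold windowTopKSum windowTopKSum_alt stepA stepB at *
    exact h2
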